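-- pv_equiv track=rewrite | github.com/dmwm/AsyncStageout | src/python/AsyncStageOut/SchedPlugins/FIFOPriority.py | priority_algo
-- ===== SOURCE A (Python) =====
-- def priority_algo(fifo_sort_users, priority_users):
--     """
--     Priority applied to the FIFO list.
--     """
--     sorted_list = []
--     for u in fifo_sort_users:
--         if u in priority_users:
--             sorted_list.append(u)
--     priority_sort_list = sorted_list
--     for user in fifo_sort_users:
--         if user not in sorted_list:
--             priority_sort_list.append(user)
--     return priority_sort_list
-- ===== SOURCE B (Python) =====
-- def priority_algo(fifo_sort_users, priority_users):
--     """
--     Priority applied to the FIFO list.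
--     """
--     pset = set(priority_users)
--     priority = []
--     others = []
--     seen = set()
--     for u in fifo_sort_users:
--         if u in pset:
--             priority.append(u)
--         elif u not in seen:
--             seen.add(u)
--             others.append(u)
--     return priority + others
-- ===== Notes on version B (the rewrite author's own statement) =====
-- stated objective: faster
-- what changed: Replaces A's two sequential passes (the second scanning the growing result list on every iteration) by one single pass with an accumulator triple (priority list, others list, seen set): each user is routed to the priority bucket or, if unseen, to the deduped others bucket, and the buckets are concatenated.
import Mathlib
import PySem

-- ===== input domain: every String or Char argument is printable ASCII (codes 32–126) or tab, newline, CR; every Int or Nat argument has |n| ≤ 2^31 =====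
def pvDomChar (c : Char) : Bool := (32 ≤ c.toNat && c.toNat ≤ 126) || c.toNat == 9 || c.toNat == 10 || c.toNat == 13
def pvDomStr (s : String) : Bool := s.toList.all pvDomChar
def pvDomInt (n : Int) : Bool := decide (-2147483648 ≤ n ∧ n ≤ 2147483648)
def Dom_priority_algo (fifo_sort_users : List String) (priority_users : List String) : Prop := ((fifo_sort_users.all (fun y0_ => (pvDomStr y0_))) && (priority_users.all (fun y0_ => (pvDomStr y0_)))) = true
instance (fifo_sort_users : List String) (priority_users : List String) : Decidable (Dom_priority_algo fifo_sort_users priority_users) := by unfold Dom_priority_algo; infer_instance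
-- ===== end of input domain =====

-- B makes one pass with an accumulator triple (priority bucket, deduped others bucket, seen set)
-- instead of A's two passes whose second scans the growing result list; return value identical.

-- ===== PORT A =====
def priority_algo (fifo_sort_users : List String) (priority_users : List String) : List String :=
  -- sorted_list = []; for u in fifo_sort_users: if u in priority_users: sorted_list.append(u)
  let sorted_list :=
    fifo_sort_users.foldl (fun acc u => if u ∈ priority_users then acc ++ [u] else acc) []
  -- priority_sort_list = sorted_list (alias); for user in fifo_sort_users:
  --   if user not in sorted_list: priority_sort_list.append(user)
  -- the alias means the membership test sees the appended users too:
  fifo_sort_users.foldl (fun acc user => if user ∈ acc then acc else acc ++ [user]) sorted_list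

-- ===== PORT B =====
def priority_algo_alt (fifo_sort_users : List String) (priority_users : List String) : List String :=
  let pset := PySem.Set.ofList priority_users
  let st := fifo_sort_users.foldl
    (fun (st : List String × List String × PySem.Set String) u =>
      if PySem.Set.contains pset u then (st.1 ++ [u], st.2.1, st.2.2)
      else if PySem.Set.contains st.2.2 u then st
      else (st.1, st.2.1 ++ [u], PySem.Set.add st.2.2 u))
    ([], [], PySem.Set.empty)
  st.1 ++ st.2.1

-- ===== PRECONDITION & SPEC =====
def Spec_priority_algo (fifo_sort_users : List String) (priority_users : List String) (out : List String) : Prop := out = priority_algo_alt fifo_sort_users priority_users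
instance (fifo_sort_users : List String) (priority_users : List String) (out : List String) : Decidable (Spec_priority_algo fifo_sort_users priority_users out) := by unfold Spec_priority_algo; infer_instance

-- ===== CLAIM (what is proved, stated in full; the proofs are below) =====
def Claim_equal_priority_algo : Prop := ∀ (fifo_sort_users : List String) (priority_users : List String), Dom_priority_algo fifo_sort_users priority_users → Spec_priority_algo fifo_sort_users priority_users (priority_algo fifo_sort_users priority_users)

-- ===== LEMMAS AND PROOFS =====

-- A's second loop, started on pr ++ ot where pr holds exactly the p-elements of the
-- traversed list: it leaves pr untouched and dedups the non-p elements into ot.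
theorem fold_dedup_split (p : String → Bool) :
    ∀ (xs pr ot : List String),
      (∀ u ∈ pr, p u = true) → (∀ u ∈ xs, p u = true → u ∈ pr) →
      xs.foldl (fun acc user => if user ∈ acc then acc else acc ++ [user]) (pr ++ ot)
        = pr ++ (xs.filter (fun u => !p u)).foldl
            (fun acc user => if user ∈ acc then acc else acc ++ [user]) ot := by
  intro xs
  induction xs with
  | nil => intro pr ot _ _; simp
  | cons u xs ih =>
    intro pr ot hpr hxs
    by_cases hu : p u = true
    · have hmem : u ∈ pr ++ ot := List.mem_append_left _ (hxs u (by simp) hu)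
      simp only [List.foldl_cons, List.filter_cons, hu, Bool.not_true, if_pos hmem]
      exact ih pr ot hpr (fun v hv => hxs v (by simp [hv]))
    · have hnpr : u ∉ pr := fun h => hu (hpr u h)
      have hiff : (u ∈ pr ++ ot) ↔ u ∈ ot := by simp [List.mem_append, hnpr]
      simp only [List.foldl_cons, List.filter_cons, eq_false_of_ne_true hu, Bool.not_false]
      by_cases hot : u ∈ ot
      · rw [if_pos (hiff.mpr hot)]
        simp only [if_true]
        rw [List.foldl_cons, if_pos hot]
        exact ih pr ot hpr (fun v hv => hxs v (by simp [hv]))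
      · rw [if_neg (fun h => hot (hiff.mp h)), List.append_assoc]
        simp only [if_true]
        rw [List.foldl_cons, if_neg hot]
        exact ih pr (ot ++ [u]) hpr (fun v hv => hxs v (by simp [hv]))

-- B's single pass, characterised: under the invariant that the seen set mirrors the
-- others bucket, the priority bucket collects the p-elements and the others bucket is
-- the membership-dedup fold over the non-p elements.
theorem b_fold_split (q : String → Bool) :
    ∀ (xs : List String) (pr ot : List String) (seen : PySem.Set String),
      (∀ u, PySem.Set.contains seen u = decide (u ∈ ot)) →
      (xs.foldl
        (fun (st : List String × List String × PySem.Set String) u =>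
          if q u then (st.1 ++ [u], st.2.1, st.2.2)
          else if PySem.Set.contains st.2.2 u then st
          else (st.1, st.2.1 ++ [u], PySem.Set.add st.2.2 u))
        (pr, ot, seen)).1 = pr ++ xs.filter q ∧
      (xs.foldl
        (fun (st : List String × List String × PySem.Set String) u =>
          if q u then (st.1 ++ [u], st.2.1, st.2.2)
          else if PySem.Set.contains st.2.2 u then st
          else (st.1, st.2.1 ++ [u], PySem.Set.add st.2.2 u))
        (pr, ot, seen)).2.1
        = (xs.filter (fun u => !q u)).foldl
            (fun acc user => if user ∈ acc then acc else acc ++ [user]) ot := by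
  intro xs
  induction xs with
  | nil => intro pr ot seen _; simp
  | cons u xs ih =>
    intro pr ot seen hinv
    by_cases hu : q u = true
    · simp only [List.foldl_cons, List.filter_cons, hu, Bool.not_true, if_pos]
      have := ih (pr ++ [u]) ot seen hinv
      simpa [List.append_assoc] using this
    · simp only [List.foldl_cons, List.filter_cons, eq_false_of_ne_true hu, Bool.not_false,
        if_true]
      by_cases hot : u ∈ ot
      · have hc : PySem.Set.contains seen u = true := by rw [hinv]; simpa
        rw [hc]
        simp only [if_pos hot]
        exact ih pr ot seen hinv
      · have hc : PySem.Set.contains seen u = false := by rw [hinv]; simpa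
        rw [hc]
        simp only [Bool.false_eq_true, if_false, if_neg hot]
        refine ih pr (ot ++ [u]) (PySem.Set.add seen u) ?_
        intro v
        have hconts : ∀ (s : PySem.Set String) (w : String),
            PySem.Set.contains s w = decide (w ∈ s) := by
          intro s w; simp [PySem.Set.contains]
        have hseen : (v ∈ seen) ↔ v ∈ ot :=
          decide_eq_decide.mp (by rw [← hconts]; exact hinv v)
        rw [hconts, decide_eq_decide, PySem.Set.mem_add]
        simp [hseen, List.mem_append]

theorem priority_algo_eq (fifo_sort_users priority_users : List String) :
    priority_algo fifo_sort_users priority_users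
      = priority_algo_alt fifo_sort_users priority_users := by
  have hset : ∀ u : String,
      PySem.Set.contains (PySem.Set.ofList priority_users) u = decide (u ∈ priority_users) := by
    intro u; simp [PySem.Set.contains, PySem.Set.mem_ofList]
  have hA : priority_algo fifo_sort_users priority_users
      = fifo_sort_users.foldl (fun acc user => if user ∈ acc then acc else acc ++ [user])
          (fifo_sort_users.foldl
            (fun acc u => if u ∈ priority_users then acc ++ [u] else acc) []) := rfl
  have hB : priority_algo_alt fifo_sort_users priority_users
      = (fifo_sort_users.foldl
          (fun (st : List String × List String × PySem.Set String) u =>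
            if PySem.Set.contains (PySem.Set.ofList priority_users) u
              then (st.1 ++ [u], st.2.1, st.2.2)
            else if PySem.Set.contains st.2.2 u then st
            else (st.1, st.2.1 ++ [u], PySem.Set.add st.2.2 u))
          ([], [], PySem.Set.empty)).1
        ++ (fifo_sort_users.foldl
          (fun (st : List String × List String × PySem.Set String) u =>
            if PySem.Set.contains (PySem.Set.ofList priority_users) u
              then (st.1 ++ [u], st.2.1, st.2.2)
            else if PySem.Set.contains st.2.2 u then st
            else (st.1, st.2.1 ++ [u], PySem.Set.add st.2.2 u))
          ([], [], PySem.Set.empty)).2.1 := rfl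
  have hBstep : (fun (st : List String × List String × PySem.Set String) u =>
      if PySem.Set.contains (PySem.Set.ofList priority_users) u
        then (st.1 ++ [u], st.2.1, st.2.2)
      else if PySem.Set.contains st.2.2 u then st
      else (st.1, st.2.1 ++ [u], PySem.Set.add st.2.2 u))
      = (fun (st : List String × List String × PySem.Set String) u =>
      if (fun u => decide (u ∈ priority_users)) u then (st.1 ++ [u], st.2.1, st.2.2)
      else if PySem.Set.contains st.2.2 u then st
      else (st.1, st.2.1 ++ [u], PySem.Set.add st.2.2 u)) := by
    funext st u; rw [hset]
  have hinv : ∀ u : String, PySem.Set.contains (PySem.Set.empty : PySem.Set String) u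
      = decide (u ∈ ([] : List String)) := by
    intro u; simp [PySem.Set.empty, PySem.Set.contains]
  obtain ⟨hb1, hb2⟩ := b_fold_split (fun u => decide (u ∈ priority_users))
    fifo_sort_users [] [] PySem.Set.empty hinv
  have h1 : fifo_sort_users.foldl
      (fun acc u => if u ∈ priority_users then acc ++ [u] else acc) []
      = fifo_sort_users.filter (fun u => decide (u ∈ priority_users)) := by
    rw [PySem.List.foldl_append_ite_eq_filter]
    simp
  rw [hA, hB, hBstep, hb1, hb2, h1]
  have hsplit := fold_dedup_split (fun u => decide (u ∈ priority_users)) fifo_sort_users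
      (fifo_sort_users.filter (fun u => decide (u ∈ priority_users))) []
      (fun u hu => (List.mem_filter.1 hu).2)
      (fun u hu hp => List.mem_filter.2 ⟨hu, hp⟩)
  simp only [List.append_nil] at hsplit
  rw [hsplit]
  simp

-- ===== VERDICT (by name: the statement is the Claim_ definition above) =====
theorem priority_algo_spec : Claim_equal_priority_algo := by
  intro f p _
  exact priority_algo_eq f p
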